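-- pv_equiv track=rewrite | github.com/kenkitts/advent_of_code_2019 | day_4/day_4_p1.py | passcode_verification
-- ===== SOURCE A (Python) =====
-- def passcode_verification(passcode):
--     passcode = str(passcode)
--     validation_1, validation_2 = False, True
--     for x, y in enumerate(passcode):
--         if x + 1 == len(passcode):
--             break
--         if y == passcode[x + 1]:
--             validation_1 = True
--         if passcode[x + 1] < y:
--             validation_2 = False
--     if validation_1 and validation_2 is True:
--         return True
--     else:
--         return False
-- ===== SOURCE B (Python) =====
-- def passcode_verification(passcode):
--     s = str(passcode)
--     return s == ''.join(sorted(s)) and len(set(s)) < len(s)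
-- ===== Notes on version B (the rewrite author's own statement) =====
-- stated objective: simpler
-- what changed: Replaces A's index-based pairwise scan with two aggregate tests: the string equals its sorted form (non-decreasing) and set-cardinality detects a duplicate, which is adjacent exactly when the string is sorted.
import Mathlib
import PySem

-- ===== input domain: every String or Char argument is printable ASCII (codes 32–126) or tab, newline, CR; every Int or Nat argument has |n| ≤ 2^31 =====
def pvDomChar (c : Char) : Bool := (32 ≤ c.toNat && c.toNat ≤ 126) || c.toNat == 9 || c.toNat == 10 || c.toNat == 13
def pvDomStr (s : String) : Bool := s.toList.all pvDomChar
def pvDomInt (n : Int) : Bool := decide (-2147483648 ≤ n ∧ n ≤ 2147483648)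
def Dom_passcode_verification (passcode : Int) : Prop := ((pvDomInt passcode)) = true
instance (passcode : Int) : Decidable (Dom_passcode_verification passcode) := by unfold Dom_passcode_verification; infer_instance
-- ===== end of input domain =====

-- B replaces A's index-based pairwise scan by "string equals its sorted form" plus a
-- set-cardinality duplicate test (simpler/idiomatic; duplicates are adjacent once sorted).

-- ===== PORT A =====
-- the for-loop over enumerate(passcode): state (validation_1, validation_2); the
-- 'if x + 1 == len(passcode): break' is the one-element/empty base cases, and
-- passcode[x+1] is the head of the remaining list.
def pvALoop : List Char → Bool → Bool → Bool × Bool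
  | [], v1, v2 => (v1, v2)
  | [_], v1, v2 => (v1, v2)
  | c :: d :: rest, v1, v2 =>
      pvALoop (d :: rest) (if c = d then true else v1) (if d < c then false else v2)

def passcode_verification (passcode : Int) : Bool :=
  let s := PySem.Int.toChars passcode
  let r := pvALoop s false true
  if r.1 && r.2 then true else false

-- ===== PORT B =====
def passcode_verification_alt (passcode : Int) : Bool :=
  let s := PySem.Int.toChars passcode
  (s == PySem.List.sorted s (fun c => c)) &&
    decide (PySem.List.len (PySem.Set.ofList s) < PySem.List.len s)

-- ===== PRECONDITION & SPEC =====
def Spec_passcode_verification (passcode : Int) (out : Bool) : Prop := out = passcode_verification_alt passcode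
instance (passcode : Int) (out : Bool) : Decidable (Spec_passcode_verification passcode out) := by unfold Spec_passcode_verification; infer_instance

-- ===== CLAIM (what is proved, stated in full; the proofs are below) =====
def Claim_equal_passcode_verification : Prop := ∀ (passcode : Int), Dom_passcode_verification passcode → Spec_passcode_verification passcode (passcode_verification passcode)

-- ===== LEMMAS AND PROOFS =====

-- adjacent equal pair exists (A's validation_1 in isolation)
def pvAdjEq : List Char → Bool
  | c :: d :: rest => (c == d) || pvAdjEq (d :: rest)
  | _ => false

-- non-decreasing (A's validation_2 in isolation)
def pvChain : List Char → Bool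
  | c :: d :: rest => (!decide (d < c)) && pvChain (d :: rest)
  | _ => true

theorem pvALoop_spec (l : List Char) (v1 v2 : Bool) :
    pvALoop l v1 v2 = (v1 || pvAdjEq l, v2 && pvChain l) := by
  induction l generalizing v1 v2 with
  | nil => simp [pvALoop, pvAdjEq, pvChain]
  | cons c t ih =>
    cases t with
    | nil => simp [pvALoop, pvAdjEq, pvChain]
    | cons d rest =>
      rw [pvALoop, ih]
      simp only [Prod.mk.injEq]
      refine ⟨?_, ?_⟩
      · rw [pvAdjEq]
        by_cases h : c = d
        · simp [h]
        · rw [beq_eq_false_iff_ne.mpr h]; simp [h]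
      · rw [pvChain]
        by_cases h : d < c <;> simp [h]

theorem pvPairwise_cons_cons (c d : Char) (r : List Char) :
    List.Pairwise (· ≤ ·) (c :: d :: r) ↔ c ≤ d ∧ List.Pairwise (· ≤ ·) (d :: r) := by
  constructor
  · intro h
    rcases List.pairwise_cons.mp h with ⟨h1, h2⟩
    exact ⟨h1 d (by simp), h2⟩
  · rintro ⟨hcd, h⟩
    refine List.pairwise_cons.mpr ⟨?_, h⟩
    intro a ha
    rcases List.mem_cons.mp ha with rfl | ha
    · exact hcd
    · exact le_trans hcd ((List.pairwise_cons.mp h).1 a ha)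

theorem pvChain_iff (l : List Char) : pvChain l = true ↔ List.Pairwise (· ≤ ·) l := by
  induction l with
  | nil => simp [pvChain]
  | cons c t ih =>
    cases t with
    | nil => simp [pvChain]
    | cons d rest =>
      rw [pvChain, pvPairwise_cons_cons, ← ih]
      simp [not_lt]

theorem pvSortedEq_iff (l : List Char) :
    (l == PySem.List.sorted l (fun c => c)) = true ↔ List.Pairwise (· ≤ ·) l := by
  rw [beq_iff_eq]
  constructor
  · intro h
    have := PySem.List.sorted_pairwise l (fun c => c)
    rw [← h] at this
    exact this
  · intro h
    exact (PySem.List.sorted_eq_self_of_pairwise l (fun c => c) h).symm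

theorem pvOfList_length_lt_of_not_nodup (l : List Char) (h : ¬ l.Nodup) :
    (PySem.Set.ofList l).length < l.length := by
  induction l with
  | nil => simp at h
  | cons c t ih =>
    rw [PySem.Set.ofList_cons]
    by_cases hc : c ∈ t
    · have hmem : c ∈ PySem.Set.ofList t := (PySem.Set.mem_ofList t c).mpr hc
      have : ((PySem.Set.ofList t).discard c).length < (PySem.Set.ofList t).length := by
        unfold PySem.Set.discard
        refine List.length_filter_lt_length_iff_exists.mpr ?_
        exact ⟨c, hmem, by simp⟩
      have hle := PySem.Set.length_ofList_le t
      simp only [List.length_cons]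
      omega
    · have hnd : ¬ t.Nodup := fun hn => h (List.nodup_cons.mpr ⟨hc, hn⟩)
      have hlt := ih hnd
      have : ((PySem.Set.ofList t).discard c).length ≤ (PySem.Set.ofList t).length := by
        unfold PySem.Set.discard; exact List.length_filter_le _ _
      simp only [List.length_cons]
      omega

theorem pvDupTest_iff (l : List Char) :
    ((PySem.Set.ofList l).length < l.length) ↔ ¬ l.Nodup := by
  constructor
  · intro hlt hn
    rw [PySem.Set.ofList_eq_self_of_nodup l hn] at hlt
    omega
  · exact pvOfList_length_lt_of_not_nodup l

theorem pvAdjEq_iff (l : List Char) (h : List.Pairwise (· ≤ ·) l) :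
    pvAdjEq l = true ↔ ¬ l.Nodup := by
  induction l with
  | nil => simp [pvAdjEq]
  | cons c t ih =>
    cases t with
    | nil => simp [pvAdjEq]
    | cons d rest =>
      rcases (pvPairwise_cons_cons c d rest).mp h with ⟨hcd, hrest⟩
      rw [pvAdjEq, Bool.or_eq_true, beq_iff_eq, ih hrest]
      constructor
      · rintro (rfl | hdup)
        · exact fun hn => (List.nodup_cons.mp hn).1 (by simp)
        · exact fun hn => hdup (List.nodup_cons.mp hn).2
      · intro hn
        by_cases hcdq : c = d
        · exact Or.inl hcdq
        · right
          intro hnd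
          apply hn
          refine List.nodup_cons.mpr ⟨?_, hnd⟩
          intro hc
          rcases List.mem_cons.mp hc with rfl | hc
          · exact hcdq rfl
          · exact hcdq (le_antisymm hcd ((List.pairwise_cons.mp hrest).1 c hc))

theorem pvMain (l : List Char) :
    (if (pvALoop l false true).1 && (pvALoop l false true).2 then true else false)
      = ((l == PySem.List.sorted l (fun c => c)) &&
          decide (PySem.List.len (PySem.Set.ofList l) < PySem.List.len l)) := by
  rw [pvALoop_spec]
  simp only [Bool.false_or, Bool.true_and, PySem.List.len_eq]
  by_cases hp : List.Pairwise (· ≤ ·) l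
  · have h2 : pvChain l = true := (pvChain_iff l).mpr hp
    have h3 : (l == PySem.List.sorted l (fun c => c)) = true := (pvSortedEq_iff l).mpr hp
    rw [h2, h3]
    by_cases hd : l.Nodup
    · have : pvAdjEq l = false := by
        rcases Bool.eq_false_or_eq_true (pvAdjEq l) with ht | hf
        · exact absurd hd ((pvAdjEq_iff l hp).mp ht)
        · exact hf
      rw [this]
      simp [hd, (pvDupTest_iff l)]
    · rw [(pvAdjEq_iff l hp).mpr hd]
      have := (pvDupTest_iff l).mpr hd
      simp only [Bool.and_true, Bool.true_and]
      simp [(pvDupTest_iff l), hd]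
  · have h2 : pvChain l = false := by
      rcases Bool.eq_false_or_eq_true (pvChain l) with ht | hf
      · exact absurd ((pvChain_iff l).mp ht) hp
      · exact hf
    have h3 : (l == PySem.List.sorted l (fun c => c)) = false := by
      rcases Bool.eq_false_or_eq_true (l == PySem.List.sorted l (fun c => c)) with ht | hf
      · exact absurd ((pvSortedEq_iff l).mp ht) hp
      · exact hf
    rw [h2, h3]
    simp

-- ===== VERDICT (by name: the statement is the Claim_ definition above) =====
theorem passcode_verification_spec : Claim_equal_passcode_verification := by
  intro p _
  unfold Spec_passcode_verification passcode_verification passcode_verification_alt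
  exact pvMain (PySem.Int.toChars p)
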